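-- pv_equiv track=rewrite | github.com/ryantalalai/ai-machine_learning | hw1/homework1_rjt5492.py | solve_distinct_disks
-- ===== SOURCE A (Python) =====
-- from collections import deque
--
-- def solve_distinct_disks(length, n):
--     initial_state = tuple(range(n))
--     queue = deque([(initial_state, [])])
--     visited_states = set([initial_state])
--
--     while queue:
--         current_state, current_moves = queue.popleft()
--         if current_state == tuple(range(length - n, length))[::-1]:
--             return current_moves
--         for i in range(n):
--             for step in [-2, -1, 1, 2]:
--                 new_position = current_state[i] + step
--                 if 0 <= new_position < length and new_position not in current_state:
--                     new_state = list(current_state)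
--                     new_state[i] = new_position
--                     new_state = tuple(new_state)
--                     if new_state not in visited_states:
--                         queue.append((new_state, current_moves + [(current_state[i], new_position)]))
--                         visited_states.add(new_state)
--
--     return None
-- ===== SOURCE B (Python) =====
-- from collections import deque
--
-- def solve_distinct_disks(length, n):
--     start = tuple(range(n))
--     goal = tuple(range(length - 1, length - n - 1, -1))
--     parent = {start: None}
--     queue = deque([start])
--     while queue:
--         state = queue.popleft()
--         if state == goal:
--             path = []
--             cur = state
--             while parent[cur] is not None:
--                 prev, move = parent[cur]
--                 path.append(move)
--                 cur = prev
--             path.reverse()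
--             return path
--         for i, pos in enumerate(state):
--             for tgt in (pos - 2, pos - 1, pos + 1, pos + 2):
--                 if 0 <= tgt < length and tgt not in state:
--                     nxt = state[:i] + (tgt,) + state[i + 1:]
--                     if nxt not in parent:
--                         parent[nxt] = (state, (pos, tgt))
--                         queue.append(nxt)
--     return None
-- ===== Notes on version B (the rewrite author's own statement) =====
-- stated objective: alternative
-- what changed: B runs the same-order BFS but stores only a parent-pointer dict (state -> (parent, move)) instead of copying the whole move list on every enqueued edge, precomputes the goal tuple once with a reversed range, and reconstructs the move sequence a single time when the goal is dequeued.
import Mathlib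
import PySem

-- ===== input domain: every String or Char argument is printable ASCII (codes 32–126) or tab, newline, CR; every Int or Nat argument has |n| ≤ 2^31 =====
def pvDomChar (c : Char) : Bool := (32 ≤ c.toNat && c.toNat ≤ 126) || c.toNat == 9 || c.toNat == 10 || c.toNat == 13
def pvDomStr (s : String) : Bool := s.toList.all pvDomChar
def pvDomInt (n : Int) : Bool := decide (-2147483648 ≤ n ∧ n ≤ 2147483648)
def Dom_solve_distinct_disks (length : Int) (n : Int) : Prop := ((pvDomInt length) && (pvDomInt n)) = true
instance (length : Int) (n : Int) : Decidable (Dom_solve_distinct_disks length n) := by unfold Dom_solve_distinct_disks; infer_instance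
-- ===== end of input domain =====

-- B replaces A's per-edge copied move lists by a parent-pointer map with one path
-- reconstruction at the goal (objective: alternative; same BFS order, hence same answer).
-- Both ports run the BFS loop on a fuel argument large enough for every reachable state
-- (the state space is finite); with fuel exhausted both return none, so equality is total.
-- Python's hash 'set'/'dict' are used only for membership/lookup here (their iteration
-- order is never consumed), so both ports model them with Std.HashSet / Std.HashMap,
-- which have exactly that membership behaviour.

-- fuel bound shared by both ports: strictly more than the number of distinct reachable
-- states (each of the n disks sits at its initial cell or on one of the `length` cells)
def pvFuel (length n : Int) : Nat := (length.toNat + 1) ^ (Nat.min n.toNat length.toNat) + 1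

-- ===== PORT A =====
-- one dequeued state expanded: for i in range(n): for step in [-2,-1,1,2]: …
-- `current_state` always has length n, so 'for i in range(n): … current_state[i] …' walks
-- the (value, index) pairs of cur (vi.1 = current_state[i]); a pyGetD per i would read the
-- same values but index the list quadratically, which large generated states cannot afford
def pvExpandA (length n : Int) (cur : List Int) (mv : List (Int × Int))
    (acc : List (List Int × List (Int × Int)) × Std.HashSet (List Int)) :
    List (List Int × List (Int × Int)) × Std.HashSet (List Int) :=
  cur.zipIdx.foldl (fun acc vi =>
    ([-2, -1, 1, 2] : List Int).foldl (fun acc step =>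
      let np := vi.1 + step
      -- 'and' short-circuits in Python: the membership test runs only inside the bounds check
      if 0 ≤ np ∧ np < length then
        if np ∉ cur then
          let ns := PySem.List.pySetD cur (vi.2 : Int) np
          if acc.2.contains ns then acc
          else (acc.1 ++ [(ns, mv ++ [(vi.1, np)])], acc.2.insert ns)
        else acc
      else acc) acc) acc

-- the while-queue loop, on fuel
def pvBfsA (length n : Int) : Nat → List (List Int × List (Int × Int)) → Std.HashSet (List Int) →
    Option (List (Int × Int))
  | 0, _, _ => none
  | _ + 1, [], _ => none
  | f + 1, (cur, mv) :: rest, vis =>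
    if cur == (PySem.List.pyRange (length - n) length 1).reverse then some mv
    else
      let qv := pvExpandA length n cur mv (rest, vis)
      pvBfsA length n f qv.1 qv.2

def solve_distinct_disks (length : Int) (n : Int) : Option (List (Int × Int)) :=
  let initial_state := PySem.List.pyRange 0 n 1
  pvBfsA length n (pvFuel length n) [(initial_state, [])] (Std.HashSet.ofList [initial_state])

-- ===== PORT B =====
-- path reconstruction: walk the parent map back from the goal, then reverse
def pvRecon : Nat → Std.HashMap (List Int) (Option (List Int × (Int × Int))) → List Int →
    List (Int × Int) → List (Int × Int)
  | 0, _, _, path => path.reverse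
  | f + 1, par, cur, path =>
    match par[cur]? with
    | some (some pm) => pvRecon f par pm.1 (path ++ [pm.2])
    | _ => path.reverse

-- one dequeued state expanded: for i, pos in enumerate(state): for tgt in (pos-2, pos-1, pos+1, pos+2): …
def pvExpandB (length : Int) (cur : List Int)
    (acc : List (List Int) × Std.HashMap (List Int) (Option (List Int × (Int × Int)))) :
    List (List Int) × Std.HashMap (List Int) (Option (List Int × (Int × Int))) :=
  -- list(enumerate(state)) = PySem.List.enumerate cur 0, written in its List.zipIdx form
  -- (PySem.List.enumerate_eq_zipIdx_map) so that very long states evaluate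
  (cur.zipIdx.map (fun p => ((0 : Int) + p.2, p.1))).foldl (fun acc ip =>
    ([ip.2 - 2, ip.2 - 1, ip.2 + 1, ip.2 + 2] : List Int).foldl (fun acc tgt =>
      -- 'and' short-circuits in Python: the membership test runs only inside the bounds check
      if 0 ≤ tgt ∧ tgt < length then
        if tgt ∉ cur then
          let nxt := PySem.List.slice cur none (some ip.1) ++ tgt ::
                     PySem.List.slice cur (some (ip.1 + 1)) none
          if acc.2.contains nxt then acc
          else (acc.1 ++ [nxt], acc.2.insert nxt (some (cur, (ip.2, tgt))))
        else acc
      else acc) acc) acc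

-- the while-queue loop, on fuel (fuel0 is also the reconstruction fuel; a path is
-- always strictly shorter than the number of dequeues performed, hence < fuel0)
def pvBfsB (length : Int) (goal : List Int) (fuel0 : Nat) :
    Nat → List (List Int) → Std.HashMap (List Int) (Option (List Int × (Int × Int))) →
    Option (List (Int × Int))
  | 0, _, _ => none
  | _ + 1, [], _ => none
  | f + 1, cur :: rest, par =>
    if cur == goal then some (pvRecon fuel0 par cur [])
    else
      let qp := pvExpandB length cur (rest, par)
      pvBfsB length goal fuel0 f qp.1 qp.2

def solve_distinct_disks_alt (length : Int) (n : Int) : Option (List (Int × Int)) :=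
  let start := PySem.List.pyRange 0 n 1
  let goal := PySem.List.pyRange (length - 1) (length - n - 1) (-1)
  pvBfsB length goal (pvFuel length n) (pvFuel length n) [start]
    ((∅ : Std.HashMap (List Int) (Option (List Int × (Int × Int)))).insert start none)

-- ===== PRECONDITION & SPEC =====
def Spec_solve_distinct_disks (length : Int) (n : Int) (out : Option (List (Int × Int))) : Prop := out = solve_distinct_disks_alt length n
instance (length : Int) (n : Int) (out : Option (List (Int × Int))) : Decidable (Spec_solve_distinct_disks length n out) := by unfold Spec_solve_distinct_disks; infer_instance

-- ===== CLAIM (what is proved, stated in full; the proofs are below) =====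
def Claim_equal_solve_distinct_disks : Prop := ∀ (length : Int) (n : Int), Dom_solve_distinct_disks length n → Spec_solve_distinct_disks length n (solve_distinct_disks length n)

-- ===== LEMMAS AND PROOFS =====

-- "the parent map traces state s back to the start with move list mv"
inductive pvChain (par : Std.HashMap (List Int) (Option (List Int × (Int × Int)))) :
    List Int → List (Int × Int) → Prop
  | nil {s} : par[s]? = some none → pvChain par s []
  | cons {s p m mv} : par[s]? = some (some (p, m)) → pvChain par p mv →
      pvChain par s (mv ++ [m])

lemma pvChain_insert {par s mv k v} (h : pvChain par s mv)
    (hk : par[k]? = none) : pvChain (par.insert k v) s mv := by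
  induction h with
  | nil hs =>
    refine pvChain.nil ?_
    rw [Std.HashMap.getElem?_insert, if_neg (by simp; rintro rfl; simp [hk] at hs)]
    exact hs
  | cons hs _ ih =>
    refine pvChain.cons ?_ ih
    rw [Std.HashMap.getElem?_insert, if_neg (by simp; rintro rfl; simp [hk] at hs)]
    exact hs

lemma pvRecon_of_chain {par s mv} (h : pvChain par s mv) :
    ∀ f acc, mv.length ≤ f → pvRecon f par s acc = (acc ++ mv.reverse).reverse := by
  induction h with
  | nil hs =>
    intro f acc _
    cases f with
    | zero => simp [pvRecon]
    | succ f => simp [pvRecon, hs]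
  | cons hs _ ih =>
    intro f acc hf
    cases f with
    | zero => simp at hf
    | succ f =>
      simp only [pvRecon, hs]
      rw [ih f (acc ++ [_]) (by simp at hf ⊢; omega)]
      simp

-- visited-set / parent-map membership agree
def pvMemEq (vis : Std.HashSet (List Int))
    (par : Std.HashMap (List Int) (Option (List Int × (Int × Int)))) : Prop :=
  ∀ s, vis.contains s = par[s]?.isSome

-- queue correspondence: same states in order, and each A-entry's move list is the
-- parent chain of its state, bounded in length by k, states all of width n
def pvQInv (n : Int) (par : Std.HashMap (List Int) (Option (List Int × (Int × Int))))
    (k : Nat) (qA : List (List Int × List (Int × Int))) (qB : List (List Int)) : Prop :=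
  qA.map Prod.fst = qB ∧
  ∀ p ∈ qA, pvChain par p.1 p.2 ∧ p.2.length ≤ k ∧ p.1.length = n.toNat

lemma pvQInv_mono {n par k k' qA qB} (h : pvQInv n par k qA qB) (hk : k ≤ k') :
    pvQInv n par k' qA qB :=
  ⟨h.1, fun p hp => ⟨(h.2 p hp).1, le_trans (h.2 p hp).2.1 hk, (h.2 p hp).2.2⟩⟩

-- relation maintained through one state's expansion
def pvERel (n : Int) (cur : List Int) (mv : List (Int × Int)) (k : Nat)
    (a : List (List Int × List (Int × Int)) × Std.HashSet (List Int))
    (b : List (List Int) × Std.HashMap (List Int) (Option (List Int × (Int × Int)))) : Prop :=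
  pvQInv n b.2 k a.1 b.1 ∧ pvMemEq a.2 b.2 ∧ pvChain b.2 cur mv

-- one fold stepping two related accumulators in lock-step
lemma pvFoldl_rel {α β γ : Type} {R : α → β → Prop} {l : List γ} {f : α → γ → α} {g : β → γ → β}
    (hstep : ∀ c ∈ l, ∀ a b, R a b → R (f a c) (g b c)) :
    ∀ a b, R a b → R (l.foldl f a) (l.foldl g b) := by
  induction l with
  | nil => intro a b h; exact h
  | cons c l ih =>
    intro a b h
    exact ih (fun c' hc' => hstep c' (List.mem_cons_of_mem _ hc'))
      _ _ (hstep c List.mem_cons_self a b h)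

-- one candidate move (state cur, disk index i, target cell tgt) processed on both sides
lemma pvCand_sim {length n : Int} {cur : List Int} {mv : List (Int × Int)} {k : Nat}
    {a : List (List Int × List (Int × Int)) × Std.HashSet (List Int)}
    {b : List (List Int) × Std.HashMap (List Int) (Option (List Int × (Int × Int)))}
    (i pos tgt : Int) (hi : 0 ≤ i) (hi2 : i < (cur.length : Int))
    (hlen : cur.length = n.toNat) (hd : mv.length + 1 ≤ k)
    (hr : pvERel n cur mv k a b) :
    pvERel n cur mv k
      (if 0 ≤ tgt ∧ tgt < length then
         if tgt ∉ cur then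
           if a.2.contains (PySem.List.pySetD cur i tgt) then a
           else (a.1 ++ [(PySem.List.pySetD cur i tgt,
                   mv ++ [(pos, tgt)])],
                 a.2.insert (PySem.List.pySetD cur i tgt))
         else a
       else a)
      (if 0 ≤ tgt ∧ tgt < length then
         if tgt ∉ cur then
           if b.2.contains (PySem.List.slice cur none (some i) ++ tgt ::
                PySem.List.slice cur (some (i + 1)) none) then b
           else (b.1 ++ [PySem.List.slice cur none (some i) ++ tgt ::
                   PySem.List.slice cur (some (i + 1)) none],
                 b.2.insert
                   (PySem.List.slice cur none (some i) ++ tgt ::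
                    PySem.List.slice cur (some (i + 1)) none)
                   (some (cur, (pos, tgt))))
         else b
       else b) := by
  have hns : PySem.List.slice cur none (some i) ++ tgt ::
      PySem.List.slice cur (some (i + 1)) none = PySem.List.pySetD cur i tgt := by
    rw [PySem.List.slice_to cur hi, PySem.List.slice_from cur (by omega : (0:Int) ≤ i + 1),
        PySem.List.pySetD_of_nonneg cur tgt hi,
        List.set_eq_take_cons_drop _ (by omega : i.toNat < cur.length),
        show (i + 1).toNat = i.toNat + 1 from by omega]
  rw [hns]
  by_cases hc : 0 ≤ tgt ∧ tgt < length
  swap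
  · rw [if_neg hc, if_neg hc]; exact hr
  · rw [if_pos hc, if_pos hc]
    by_cases hc2 : tgt ∉ cur
    swap
    · rw [if_neg hc2, if_neg hc2]; exact hr
    rw [if_pos hc2, if_pos hc2]
    have hmem := hr.2.1 (PySem.List.pySetD cur i tgt)
    by_cases hin : a.2.contains (PySem.List.pySetD cur i tgt) = true
    · rw [if_pos hin, if_pos (by rw [Std.HashMap.contains_eq_isSome_getElem?, ← hmem]; exact hin)]
      exact hr
    · have hnone : b.2[PySem.List.pySetD cur i tgt]? = none := by
        rw [hmem] at hin
        exact Option.not_isSome_iff_eq_none.mp hin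
      rw [if_neg hin,
        if_neg (by rw [Std.HashMap.contains_eq_isSome_getElem?, hnone]; simp)]
      refine ⟨⟨by simp [hr.1.1], ?_⟩, ?_, pvChain_insert hr.2.2 hnone⟩
      · intro p hp
        rcases List.mem_append.1 hp with hp | hp
        · obtain ⟨h1, h2, h3⟩ := hr.1.2 p hp
          exact ⟨pvChain_insert h1 hnone, h2, h3⟩
        · simp only [List.mem_singleton] at hp
          subst hp
          refine ⟨pvChain.cons (Std.HashMap.getElem?_insert_self)
              (pvChain_insert hr.2.2 hnone), by simpa using hd, ?_⟩
          simp [PySem.List.pySetD_of_nonneg cur tgt hi, hlen]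
      · intro s
        rw [Std.HashSet.contains_insert, Std.HashMap.getElem?_insert]
        by_cases hs : PySem.List.pySetD cur i tgt = s
        · simp [hs]
        · rw [if_neg (by simpa using hs)]
          have hbe : (PySem.List.pySetD cur i tgt == s) = false := by simpa using hs
          rw [hbe]
          simpa using hr.2.1 s

lemma pvExpand_sim {length n cur mv k a b}
    (hlen : cur.length = n.toNat) (hd : mv.length + 1 ≤ k)
    (hr : pvERel n cur mv k a b) :
    pvERel n cur mv k (pvExpandA length n cur mv a) (pvExpandB length cur b) := by
  unfold pvExpandA pvExpandB
  rw [List.foldl_map]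
  refine pvFoldl_rel ?_ a b hr
  intro vi hvi accA accB hacc
  have hk : vi.2 < cur.length := by
    have := List.mem_zipIdx (x := vi.1) (i := vi.2) (by simpa using hvi)
    omega
  have hi : (0 : Int) ≤ (vi.2 : Int) := by positivity
  have hi2 : (vi.2 : Int) < (cur.length : Int) := by exact_mod_cast hk
  simp only [List.foldl, zero_add]
  exact pvCand_sim (vi.2 : Int) vi.1 (vi.1 + 2) hi hi2 hlen hd
    (pvCand_sim (vi.2 : Int) vi.1 (vi.1 + 1) hi hi2 hlen hd
      (pvCand_sim (vi.2 : Int) vi.1 (vi.1 + -1) hi hi2 hlen hd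
        (pvCand_sim (vi.2 : Int) vi.1 (vi.1 + -2) hi hi2 hlen hd hacc)))

lemma pvBfs_sim (length n : Int) (fuel0 : Nat) :
    ∀ (f : Nat) qA qB vis par, f ≤ fuel0 →
      pvQInv n par (fuel0 - f) qA qB → pvMemEq vis par →
      pvBfsA length n f qA vis =
      pvBfsB length (PySem.List.pyRange (length - 1) (length - n - 1) (-1)) fuel0 f qB par := by
  have hgoal : PySem.List.pyRange (length - 1) (length - n - 1) (-1) =
      (PySem.List.pyRange (length - n) length 1).reverse := by
    rw [PySem.List.pyRange_neg_one_eq_reverse,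
      show length - n - 1 + 1 = length - n from by ring,
      show length - 1 + 1 = length from by ring]
  intro f
  induction f with
  | zero => intro qA qB vis par _ _ _; simp [pvBfsA, pvBfsB]
  | succ f ih =>
    intro qA qB vis par hf hq hm
    match qA, hq with
    | [], hq =>
      have hb : qB = [] := by simpa using hq.1.symm
      subst hb
      simp [pvBfsA, pvBfsB]
    | (cur, mv) :: rest, hq =>
      have hb : qB = cur :: rest.map Prod.fst := by
        have := hq.1; simpa using this.symm
      subst hb
      have hhead := hq.2 (cur, mv) (List.mem_cons_self)
      have hch : pvChain par cur mv := hhead.1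
      have hmvlen : mv.length ≤ fuel0 - (f + 1) := hhead.2.1
      have hwid : cur.length = n.toNat := hhead.2.2
      simp only [pvBfsA, pvBfsB, hgoal, beq_iff_eq]
      by_cases hg : cur = (PySem.List.pyRange (length - n) length 1).reverse
      · subst hg
        rw [if_pos rfl, if_pos rfl,
          pvRecon_of_chain hch fuel0 [] (le_trans hmvlen (by omega))]
        simp
      · simp only [hg, if_false]
        have hrest : pvQInv n par (fuel0 - (f + 1)) rest (rest.map Prod.fst) :=
          ⟨rfl, fun p hp => hq.2 p (List.mem_cons_of_mem _ hp)⟩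
        have her : pvERel n cur mv (fuel0 - f)
            (rest, vis) (rest.map Prod.fst, par) :=
          ⟨pvQInv_mono hrest (by omega), hm, hch⟩
        have hout := pvExpand_sim (length := length) hwid (by omega) her
        rw [← hgoal]
        exact ih _ _ _ _ (by omega) hout.1 hout.2.1

-- ===== VERDICT (by name: the statement is the Claim_ definition above) =====
theorem solve_distinct_disks_spec : Claim_equal_solve_distinct_disks := by
  intro length n _
  unfold Spec_solve_distinct_disks solve_distinct_disks solve_distinct_disks_alt
  apply pvBfs_sim length n (pvFuel length n) (pvFuel length n) _ _ _ _ (le_refl _)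
  · constructor
    · simp
    · rintro p hp
      simp at hp
      subst hp
      refine ⟨pvChain.nil (by simp), by simp, by simp⟩
  · intro s
    rw [Std.HashMap.getElem?_insert]
    by_cases h : PySem.List.pyRange 0 n 1 = s
    · simp [h]
    · rw [if_neg (by simpa using h)]
      simpa using h
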